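-- pv_equiv track=rewrite | github.com/MarcMeynadier/GD_ECT_Cnidaria | py_scripts/miscellaneous/extractOrthofinderOutput.py | extractGenes
-- ===== SOURCE A (Python) =====
-- def extractGenes(col):
--     genesL = []
--     for i in col:
--         genesL.append(i)
--     genesStr = ' '.join(genesL)
--     genesStr = genesStr.replace(',','')
--     genesList = genesStr.split()
--     return genesList
-- ===== SOURCE B (Python) =====
-- def extractGenes(col):
--     tokens = []
--     for s in col:
--         cur = []
--         for ch in s:
--             if ch == ',':
--                 continue
--             if ch.isspace():
--                 if cur:
--                     tokens.append(''.join(cur))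
--                     cur = []
--             else:
--                 cur.append(ch)
--         if cur:
--             tokens.append(''.join(cur))
--     return tokens
-- ===== Notes on version B (the rewrite author's own statement) =====
-- stated objective: alternative
-- what changed: B replaces A's staged whole-string passes (append-loop, join, replace, split) by an explicit character-level scanner: one state machine over the characters that skips commas, flushes the current token buffer on whitespace and at each string boundary, and never builds the joined string.
import Mathlib
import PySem

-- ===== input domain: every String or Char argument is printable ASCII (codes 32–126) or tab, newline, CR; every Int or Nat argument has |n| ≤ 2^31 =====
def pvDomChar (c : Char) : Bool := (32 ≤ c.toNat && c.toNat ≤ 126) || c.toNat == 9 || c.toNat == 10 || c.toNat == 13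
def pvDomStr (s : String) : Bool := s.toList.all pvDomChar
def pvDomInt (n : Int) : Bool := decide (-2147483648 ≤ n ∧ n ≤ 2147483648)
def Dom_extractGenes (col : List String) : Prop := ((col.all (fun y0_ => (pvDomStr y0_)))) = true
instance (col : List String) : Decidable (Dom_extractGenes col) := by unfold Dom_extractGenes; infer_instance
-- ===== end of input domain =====

-- B replaces A's staged whole-string passes (append-loop, join, replace, split) by an
-- explicit character-level scanner with a token buffer (objective: alternative).

-- ===== PORT A =====
def extractGenes (col : List String) : List String :=
  let genesL := col.foldl (fun acc i => acc ++ [i]) []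
  let genesStr := PySem.Str.join " " genesL
  let genesStr2 := PySem.Str.replace genesStr "," ""
  PySem.Str.split₀ genesStr2

-- ===== PORT B =====
-- one character step of the scanner: state = (tokens so far, current token buffer)
def egStep (st : List String × List Char) (ch : Char) : List String × List Char :=
  if ch = ',' then st
  else if PySem.Chars.isspace ch then
    if st.2.isEmpty then st else (st.1 ++ [String.ofList st.2], [])
  else (st.1, st.2 ++ [ch])

def extractGenes_alt (col : List String) : List String :=
  col.foldl (fun tokens s =>
    let st := s.toList.foldl egStep (tokens, [])
    if st.2.isEmpty then st.1 else st.1 ++ [String.ofList st.2]) []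

-- ===== PRECONDITION & SPEC =====
def Spec_extractGenes (col : List String) (out : List String) : Prop := out = extractGenes_alt col
instance (col : List String) (out : List String) : Decidable (Spec_extractGenes col out) := by unfold Spec_extractGenes; infer_instance

-- ===== CLAIM (what is proved, stated in full; the proofs are below) =====
def Claim_equal_extractGenes : Prop := ∀ (col : List String), Dom_extractGenes col → Spec_extractGenes col (extractGenes col)

-- ===== LEMMAS AND PROOFS =====

-- replace(s, ",", "") removes exactly the commas
theorem replace_go_comma (l : List Char) : ∀ acc : List Char,
    PySem.Chars.replace.go [','] [] l.length l acc = acc.reverse ++ l.filter (· != ',') := by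
  induction l with
  | nil => intro acc; simp [PySem.Chars.replace.go]
  | cons c t ih =>
    intro acc
    by_cases hc : c = ','
    · subst hc
      simp [PySem.Chars.replace.go, List.isPrefixOf, ih]
    · simp [PySem.Chars.replace.go, List.isPrefixOf, hc, ih]
      exact fun h => hc h.symm

theorem replace_comma (l : List Char) :
    PySem.Chars.replace l [','] [] = l.filter (· != ',') := by
  simp [PySem.Chars.replace, replace_go_comma]

-- one step of split₀.go
theorem split_go_cons (c : Char) (t cur acc) :
    PySem.Chars.split₀.go (c :: t) cur acc
      = if PySem.Chars.isspace c then
          (if cur.isEmpty then PySem.Chars.split₀.go t [] acc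
           else PySem.Chars.split₀.go t [] (cur.reverse :: acc))
        else PySem.Chars.split₀.go t (c :: cur) acc := by
  rfl

-- split₀.go accumulator lemma
theorem split_go_acc (l : List Char) : ∀ cur acc,
    PySem.Chars.split₀.go l cur acc = acc.reverse ++ PySem.Chars.split₀.go l cur [] := by
  induction l with
  | nil =>
    intro cur acc
    by_cases h : cur.isEmpty <;> simp [PySem.Chars.split₀.go, h]
  | cons c t ih =>
    intro cur acc
    rw [split_go_cons, split_go_cons]
    by_cases hs : PySem.Chars.isspace c
    · by_cases h : cur.isEmpty
      · simp only [hs, h, if_true]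
        exact ih [] acc
      · simp only [hs, h, Bool.false_eq_true, if_false]
        rw [ih [] (cur.reverse :: acc), ih [] [cur.reverse]]
        simp
    · simp only [hs, Bool.false_eq_true, if_false]
      exact ih (c :: cur) acc

-- splitting at an explicit space separator
theorem split_go_space (b : List Char) (a : List Char) : ∀ cur acc,
    PySem.Chars.split₀.go (a ++ ' ' :: b) cur acc
      = PySem.Chars.split₀.go b [] ((PySem.Chars.split₀.go a cur acc).reverse) := by
  induction a with
  | nil =>
    intro cur acc
    by_cases h : cur.isEmpty <;>
      simp [PySem.Chars.split₀.go, split_go_cons, PySem.Chars.isspace, h]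
  | cons c t ih =>
    intro cur acc
    rw [List.cons_append, split_go_cons, split_go_cons]
    by_cases hs : PySem.Chars.isspace c
    · by_cases h : cur.isEmpty
      · simp only [hs, h, if_true]
        exact ih [] acc
      · simp only [hs, h, Bool.false_eq_true, if_false]
        exact ih [] (cur.reverse :: acc)
    · simp only [hs, Bool.false_eq_true, if_false]
      exact ih (c :: cur) acc

theorem split_append_space (a b : List Char) :
    PySem.Chars.split₀ (a ++ ' ' :: b) = PySem.Chars.split₀ a ++ PySem.Chars.split₀ b := by
  unfold PySem.Chars.split₀
  rw [split_go_space, split_go_acc]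
  simp

-- split₀ of a space-join is the concatenation of the pieces' splits
theorem split_join (ps : List (List Char)) :
    PySem.Chars.split₀ (PySem.Chars.join [' '] ps) = ps.flatMap PySem.Chars.split₀ := by
  induction ps with
  | nil => simp [PySem.Chars.join_nil, PySem.Chars.split₀, PySem.Chars.split₀.go]
  | cons p ps ih =>
    cases ps with
    | nil => simp [PySem.Chars.join_singleton]
    | cons q rest =>
      rw [PySem.Chars.join_cons_cons]
      have h : p ++ [' '] ++ PySem.Chars.join [' '] (q :: rest)
          = p ++ ' ' :: PySem.Chars.join [' '] (q :: rest) := by simp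
      rw [h, split_append_space, ih]
      simp

-- comma-filtering commutes with the space-join
theorem filter_join (ps : List (List Char)) :
    (PySem.Chars.join [' '] ps).filter (· != ',')
      = PySem.Chars.join [' '] (ps.map (·.filter (· != ','))) := by
  induction ps with
  | nil => simp [PySem.Chars.join_nil]
  | cons p ps ih =>
    cases ps with
    | nil => simp [PySem.Chars.join_singleton]
    | cons q rest =>
      rw [PySem.Chars.join_cons_cons, List.filter_append, List.filter_append, ih]
      simp only [List.map_cons]
      rw [PySem.Chars.join_cons_cons]
      simp

-- B's scanner over one string, flushed, equals split₀ of the comma-filtered characters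
theorem scan_eq (l : List Char) : ∀ (tokens : List String) (cur : List Char),
    (let st := l.foldl egStep (tokens, cur)
     if st.2.isEmpty then st.1 else st.1 ++ [String.ofList st.2])
      = tokens ++ (PySem.Chars.split₀.go (l.filter (· != ',')) cur.reverse []).map String.ofList := by
  induction l with
  | nil =>
    intro tokens cur
    by_cases h : cur.isEmpty
    · have : cur = [] := by cases cur <;> simp_all
      subst this
      simp [PySem.Chars.split₀.go]
    · have hne : cur ≠ [] := by cases cur <;> simp_all
      simp [PySem.Chars.split₀.go, h, ]
  | cons c t ih =>
    intro tokens cur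
    by_cases hc : c = ','
    · subst hc
      simp only [List.foldl_cons, egStep, if_true, List.filter_cons]
      simpa using ih tokens cur
    · by_cases hs : PySem.Chars.isspace c
      · have hcomma : ((c != ',') = true) := by simp [hc]
        simp only [List.foldl_cons, egStep, hc, if_false, hs, if_true, List.filter_cons, hcomma]
        rw [split_go_cons]
        simp only [hs, if_true]
        by_cases h : cur.isEmpty
        · have : cur = [] := by cases cur <;> simp_all
          subst this
          simp only [List.isEmpty_nil, if_true, List.reverse_nil]
          exact ih tokens []
        · have hcne : (cur.reverse.isEmpty = true) ↔ False := by
            cases cur <;> simp_all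
          simp only [h, Bool.false_eq_true, if_false, hcne] at *
          rw [split_go_acc, ih (tokens ++ [String.ofList cur]) []]
          simp
      · have hcomma : ((c != ',') = true) := by simp [hc]
        simp only [List.foldl_cons, egStep, hc, if_false, hs, Bool.false_eq_true,
          List.filter_cons, hcomma, if_true]
        rw [split_go_cons]
        simp only [hs, Bool.false_eq_true, if_false]
        have := ih tokens (cur ++ [c])
        simpa using this

-- the canonical tokenization both programs compute
theorem alt_eq_flatMap (col : List String) :
    extractGenes_alt col
      = col.flatMap (fun s => (PySem.Chars.split₀ (s.toList.filter (· != ','))).map String.ofList) := by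
  unfold extractGenes_alt
  suffices h : ∀ (tokens : List String),
      col.foldl (fun tokens s =>
        let st := s.toList.foldl egStep (tokens, [])
        if st.2.isEmpty then st.1 else st.1 ++ [String.ofList st.2]) tokens
      = tokens ++ col.flatMap (fun s => (PySem.Chars.split₀ (s.toList.filter (· != ','))).map String.ofList) by
    simpa using h []
  induction col with
  | nil => intro tokens; simp
  | cons s rest ih =>
    intro tokens
    simp only [List.foldl_cons, List.flatMap_cons]
    rw [scan_eq s.toList tokens [], ih]
    simp [PySem.Chars.split₀]

-- ===== VERDICT (by name: the statement is the Claim_ definition above) =====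
theorem extractGenes_spec : Claim_equal_extractGenes := by
  intro col _
  unfold Spec_extractGenes extractGenes
  rw [alt_eq_flatMap, PySem.List.foldl_append_singleton]
  simp only [PySem.Str.split₀, PySem.Str.replace, PySem.Str.join]
  have hsep : (" " : String).toList = [' '] := rfl
  have hold : ("," : String).toList = [','] := rfl
  have hnew : ("" : String).toList = ([] : List Char) := rfl
  simp only [String.toList_ofList]
  rw [hsep, hold, hnew, replace_comma, filter_join, split_join]
  simp [List.flatMap_map, List.map_flatMap, Function.comp]
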